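-- pv_equiv track=rewrite | github.com/JishTheFish20/CSE_022 | assignment_7/lab7.py | heading
-- ===== SOURCE A (Python) =====
-- def heading(title, max_width=80, min_padding=4):
--     titleLength = len(title) # gets length of the title
--     overallLength = 2 + titleLength + min_padding*2 # checks the entire length of the header before we add any extra padding
--     newPadding = (max_width - overallLength) // 2 # checks how much padding needs to be added to the header
--     remainder = (max_width - overallLength) % 2 # checks if the header is odd
--
--     if(overallLength > max_width): # if our title is longer then the space we have then we will shorten it
--         for x in range(1,titleLength):
--             titleLength = len(title[:-x]) #does not look at last letter in title
--             overallLength = 2 + titleLength + min_padding*2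
--
--             if((overallLength + 3) == max_width): #checks if the changed length is shortend enough to add ellipses
--                 title = ("-"*min_padding + " " + title[:-x] + "..." + " " + "-"*min_padding)
--                 break
--
--     elif(title == ""): # if we have no title then add no spaces
--         title = ("-"*(newPadding+min_padding+1) + title + "-"*(newPadding+min_padding+1))
--     else: # if our title is shorther then the total space then add more padding to make it fill up the space
--         title = ("-"*(newPadding+min_padding) + " " + title + " " + "-"*(newPadding+min_padding + remainder))
--     return title
-- ===== SOURCE B (Python) =====
-- def heading(title, max_width=80, min_padding=4):
--     n = len(title)
--     overall = 2 + n + 2 * min_padding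
--     if overall > max_width:
--         # the loop in A breaks at the x solving 2 + (n - x) + 2*min_padding + 3 == max_width
--         x = n + 2 * min_padding + 5 - max_width
--         if 1 <= x <= n - 1:
--             return "-" * min_padding + " " + title[:-x] + "..." + " " + "-" * min_padding
--         return title
--     spare = max_width - overall
--     if title == "":
--         return "-" * (2 * (spare // 2 + min_padding + 1))
--     pad = spare // 2 + min_padding
--     return "-" * pad + " " + title + " " + "-" * (pad + spare % 2)
-- ===== Notes on version B (the rewrite author's own statement) =====
-- stated objective: faster
-- what changed: Replaced the linear search over truncation lengths (re-slicing and re-measuring the title for each x) with a closed-form solution x = n + 2*min_padding + 5 - max_width, guarded by the same 1 <= x <= n-1 range the loop covers.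
import Mathlib
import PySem

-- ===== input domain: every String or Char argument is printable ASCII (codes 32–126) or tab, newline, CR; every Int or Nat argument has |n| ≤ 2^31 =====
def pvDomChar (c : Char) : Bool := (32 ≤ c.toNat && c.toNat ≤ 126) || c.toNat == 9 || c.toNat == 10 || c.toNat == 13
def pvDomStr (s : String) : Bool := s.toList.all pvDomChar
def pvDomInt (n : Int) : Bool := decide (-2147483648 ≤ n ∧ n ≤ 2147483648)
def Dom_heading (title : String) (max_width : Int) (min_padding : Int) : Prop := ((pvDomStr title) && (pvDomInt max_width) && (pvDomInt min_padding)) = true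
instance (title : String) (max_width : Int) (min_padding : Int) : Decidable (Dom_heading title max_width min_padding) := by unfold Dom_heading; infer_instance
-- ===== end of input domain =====

-- B replaces A's linear search for the truncation length with the closed-form solution; objective: faster (asymptotic in the overflow branch).

-- ===== PORT A =====
-- "-"*n (n : Int; empty for n ≤ 0), as Python string repetition
def pvDash (n : Int) : List Char := PySem.List.pyRepeat ['-'] n

-- A's for-loop: x runs over range(1, titleLength); breaks when the shortened header fits with "..."
def headingLoopA (t : List Char) (max_width min_padding : Int) : List Int → List Char
  | [] => t
  | x :: rest =>
    let sliced := PySem.List.slice t none (some (-x))   -- title[:-x]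
    let titleLength : Int := sliced.length
    let overallLength := 2 + titleLength + min_padding * 2
    if overallLength + 3 = max_width then
      pvDash min_padding ++ [' '] ++ sliced ++ ['.', '.', '.'] ++ [' '] ++ pvDash min_padding
    else
      headingLoopA t max_width min_padding rest

def heading (title : String) (max_width : Int) (min_padding : Int) : String :=
  let t := title.toList
  let titleLength : Int := t.length
  let overallLength := 2 + titleLength + min_padding * 2
  let newPadding := PySem.Int.floordiv (max_width - overallLength) 2
  let remainder := PySem.Int.mod (max_width - overallLength) 2
  if overallLength > max_width then
    String.ofList (headingLoopA t max_width min_padding (PySem.List.pyRange 1 titleLength 1))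
  else if t = [] then
    String.ofList (pvDash (newPadding + min_padding + 1) ++ t ++ pvDash (newPadding + min_padding + 1))
  else
    String.ofList (pvDash (newPadding + min_padding) ++ [' '] ++ t ++ [' '] ++ pvDash (newPadding + min_padding + remainder))

-- ===== PORT B =====
def heading_alt (title : String) (max_width : Int) (min_padding : Int) : String :=
  let t := title.toList
  let n : Int := t.length
  let overall := 2 + n + 2 * min_padding
  if overall > max_width then
    let x := n + 2 * min_padding + 5 - max_width
    if 1 ≤ x ∧ x ≤ n - 1 then
      String.ofList (pvDash min_padding ++ [' '] ++ PySem.List.slice t none (some (-x)) ++ ['.', '.', '.'] ++ [' '] ++ pvDash min_padding)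
    else
      title
  else
    let spare := max_width - overall
    if t = [] then
      String.ofList (pvDash (2 * (PySem.Int.floordiv spare 2 + min_padding + 1)))
    else
      let pad := PySem.Int.floordiv spare 2 + min_padding
      String.ofList (pvDash pad ++ [' '] ++ t ++ [' '] ++ pvDash (pad + PySem.Int.mod spare 2))

-- ===== PRECONDITION & SPEC =====
def Spec_heading (title : String) (max_width : Int) (min_padding : Int) (out : String) : Prop := out = heading_alt title max_width min_padding
instance (title : String) (max_width : Int) (min_padding : Int) (out : String) : Decidable (Spec_heading title max_width min_padding out) := by unfold Spec_heading; infer_instance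

-- ===== CLAIM (what is proved, stated in full; the proofs are below) =====
def Claim_equal_heading : Prop := ∀ (title : String) (max_width : Int) (min_padding : Int), Dom_heading title max_width min_padding → Spec_heading title max_width min_padding (heading title max_width min_padding)

-- ===== LEMMAS AND PROOFS =====

-- doubling a dash run is two dash runs (also for non-positive counts)
theorem pvDash_double (k : Int) : pvDash (2 * k) = pvDash k ++ pvDash k := by
  simp only [pvDash, PySem.List.pyRepeat_singleton, ← List.replicate_add]
  congr 1
  omega

-- the loop body's test at x, for 1 ≤ x < t.length, holds iff x is the closed-form solution
theorem pv_slice_len (t : List Char) (x : Int) (h1 : 1 ≤ x) (h2 : x < (t.length : Int)) :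
    ((PySem.List.slice t none (some (-x))).length : Int) = (t.length : Int) - x := by
  obtain ⟨k, rfl⟩ : ∃ k : Nat, x = (k : Int) := ⟨x.toNat, by omega⟩
  rw [PySem.List.slice_to_neg_natCast t k (by exact_mod_cast h1)]
  simp [List.length_take]
  omega

theorem headingLoopA_eq (t : List Char) (mw mp : Int) (l : List Int)
    (hmem : ∀ x ∈ l, 1 ≤ x ∧ x < (t.length : Int))
    (x0 : Int) (hx0 : x0 = (t.length : Int) + 2 * mp + 5 - mw) :
    headingLoopA t mw mp l =
      if x0 ∈ l then
        pvDash mp ++ [' '] ++ PySem.List.slice t none (some (-x0)) ++ ['.', '.', '.'] ++ [' '] ++ pvDash mp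
      else t := by
  induction l with
  | nil => simp [headingLoopA]
  | cons x rest ih =>
    have hx := hmem x (by simp)
    have hlen := pv_slice_len t x hx.1 hx.2
    by_cases hc : x = x0
    · subst hc
      rw [headingLoopA]
      simp only [hlen]
      rw [if_pos (by omega), if_pos (by simp)]
    · rw [headingLoopA]
      simp only [hlen]
      rw [if_neg (by omega), ih (fun y hy => hmem y (List.mem_cons_of_mem _ hy))]
      have : (x0 ∈ x :: rest) ↔ (x0 ∈ rest) :=
        ⟨fun h => (List.mem_cons.mp h).resolve_left (fun e => hc e.symm), List.mem_cons_of_mem x⟩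
      by_cases hm : x0 ∈ rest
      · rw [if_pos hm, if_pos (this.mpr hm)]
      · rw [if_neg hm, if_neg (fun h => hm (this.mp h))]

-- ===== VERDICT (by name: the statement is the Claim_ definition above) =====
theorem heading_spec : Claim_equal_heading := by
  intro title mw mp _
  unfold Spec_heading heading heading_alt
  simp only []
  set t := title.toList with ht
  set n : Int := (t.length : Int) with hn
  by_cases hov : 2 + n + mp * 2 > mw
  · rw [if_pos hov, if_pos (by omega : 2 + n + 2 * mp > mw)]
    set x0 : Int := n + 2 * mp + 5 - mw with hx0
    rw [headingLoopA_eq t mw mp _ (fun x hx => by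
          have := (PySem.List.mem_pyRange_one (a := 1) (b := n) (x := x)).mp hx
          omega) x0 (by omega)]
    by_cases hin : x0 ∈ PySem.List.pyRange 1 n 1
    · have hb := (PySem.List.mem_pyRange_one (a := 1) (b := n) (x := x0)).mp hin
      rw [if_pos hin, if_pos (by omega)]
    · have hb : ¬ (1 ≤ x0 ∧ x0 ≤ n - 1) := fun h => hin ((PySem.List.mem_pyRange_one (a := 1) (b := n) (x := x0)).mpr (by omega))
      rw [if_neg hin, if_neg hb]
      simp [ht]
  · rw [if_neg hov, if_neg (by omega : ¬ 2 + n + 2 * mp > mw)]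
    by_cases he : t = []
    · rw [if_pos he, if_pos he]
      rw [show mw - (2 + n + 2 * mp) = mw - (2 + n + mp * 2) by ring, pvDash_double]
      simp [he]
    · rw [if_neg he, if_neg he]
      rw [show mw - (2 + n + 2 * mp) = mw - (2 + n + mp * 2) by ring]
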